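-- pv_equiv track=rewrite | github.com/Jickey0/Nand2tetris | projects/06/assembler.py | Cinstruction
-- ===== SOURCE A (Python) =====
-- def Cinstruction(line):
--     part = ''
--     dest_exist = False
--     comp_exist = False
--     jval = '000'
--     destval = '000'
--
--     for i in range(len(line)):
--         if line[i] == '=':
--             dest_exist = True
--             destval = dest[part]
--             part = ''
--             continue
--         if line[i] == ';':
--             comp_exist = True
--             cval = comp[part]
--             if 'M' in part:
--                 aval = 1
--             else:
--                 aval = 0
--             part = ''
--             continue
--         if i == len(line) - 1 and comp_exist == False:
--             part = part + line[i]
--             comp_exist = True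
--             cval = comp[part]
--             if 'M' in part:
--                 aval = 1
--             else:
--                 aval = 0
--             part = ''
--             continue
--         if i == len(line) - 1:
--             part = part + line[i]
--             jval = jump[part]
--             continue
--
--         part = part + line[i]
--
--     return '111' + str(aval) + str(cval) + str(destval) + str(jval)
--
-- comp = {
--     "0" : "101010",
--     "1" : "111111",
--     "-1" : "111010",
--     "D" : "001100",
--     "A" : "110000",
--     "M" : "110000",
--     "!D" : "001101",
--     "!A" : "110001",
--     "!M" : "110001",
--     "-D" : "001111",
--     "-A" : "110011",
--     "-M" : "110011",
--     "D+1" : "011111",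
--     "A+1" : "110111",
--     "M+1" : "110111",
--     "D-1" : "001110",
--     "A-1" : "110010",
--     "M-1" : "110010",
--     "D+A" : "000010",
--     "D+M" : "000010",
--     "D-A" : "010011",
--     "D-M" : "010011",
--     "A-D" : "000111",
--     "M-D" : "000111",
--     "D&A" : "000000",
--     "D&M" : "000000",
--     "D|A" : "010101",
--     "D|M" : "010101"
-- }
--
-- dest = {
--     'M' : '001',
--     'D' : '010',
--     'DM' : '011',
--     'MD' : '011',
--     'A' : '100',
--     'AM' : '101',
--     'AD' : '110',
--     'ADM' : '111'
-- }
--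
-- jump = {
--     'JGT' : '001',
--     'JEQ' : '010',
--     'JGE' : '011',
--     'JLT' : '100',
--     'JNE' : '101',
--     'JLE' : '110',
--     'JMP' : '111'
-- }
-- ===== SOURCE B (Python) =====
-- comp = {
--     "0": "101010", "1": "111111", "-1": "111010", "D": "001100",
--     "A": "110000", "M": "110000", "!D": "001101", "!A": "110001",
--     "!M": "110001", "-D": "001111", "-A": "110011", "-M": "110011",
--     "D+1": "011111", "A+1": "110111", "M+1": "110111", "D-1": "001110",
--     "A-1": "110010", "M-1": "110010", "D+A": "000010", "D+M": "000010",
--     "D-A": "010011", "D-M": "010011", "A-D": "000111", "M-D": "000111",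
--     "D&A": "000000", "D&M": "000000", "D|A": "010101", "D|M": "010101"
-- }
-- dest = {'M': '001', 'D': '010', 'DM': '011', 'MD': '011',
--         'A': '100', 'AM': '101', 'AD': '110', 'ADM': '111'}
-- jump = {'JGT': '001', 'JEQ': '010', 'JGE': '011', 'JLT': '100',
--         'JNE': '101', 'JLE': '110', 'JMP': '111'}
--
-- def Cinstruction(line):
--     if '=' in line:
--         dest_part, rest = line.split('=', 1)
--         destval = dest[dest_part]
--     else:
--         rest = line
--         destval = '000'
--     if ';' in rest:
--         comp_part, jump_part = rest.split(';', 1)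
--         jval = jump[jump_part] if jump_part else '000'
--     else:
--         comp_part = rest
--         jval = '000'
--     cval = comp[comp_part]
--     aval = 1 if 'M' in comp_part else 0
--     return '111' + str(aval) + cval + destval + jval
-- ===== Notes on version B (the rewrite author's own statement) =====
-- stated objective: idiomatic
-- what changed: A scans the line character by character with an indexed state machine (part accumulator, dest_exist/comp_exist flags, last-index special cases); B parses the three fields directly with one maxsplit-1 split on '=' and one on ';' and then does the three table lookups.
-- outside the precondition, e.g. on Cinstruction('M=D=0'): A returns '1110101010010000', B raises KeyError; on Cinstruction('M;M;'): A returns '1111110000000000', B raises KeyError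
import Mathlib
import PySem

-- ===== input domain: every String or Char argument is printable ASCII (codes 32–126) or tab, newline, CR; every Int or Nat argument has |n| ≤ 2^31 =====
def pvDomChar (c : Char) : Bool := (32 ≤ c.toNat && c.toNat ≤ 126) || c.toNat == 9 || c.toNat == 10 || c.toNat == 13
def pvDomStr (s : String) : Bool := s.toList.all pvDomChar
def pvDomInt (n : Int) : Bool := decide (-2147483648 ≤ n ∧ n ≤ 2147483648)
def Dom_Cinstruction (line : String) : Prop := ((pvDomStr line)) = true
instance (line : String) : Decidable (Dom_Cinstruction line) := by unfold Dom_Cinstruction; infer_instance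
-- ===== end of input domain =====

-- B replaces A's char-by-char indexed state machine with field parsing (one split on '=', one on ';'); objective: simpler/idiomatic.

-- the three lookup tables of the module (shared data, used by both ports)
def pvComp : PySem.Dict String String := PySem.Dict.ofList
  [("0","101010"), ("1","111111"), ("-1","111010"), ("D","001100"),
   ("A","110000"), ("M","110000"), ("!D","001101"), ("!A","110001"),
   ("!M","110001"), ("-D","001111"), ("-A","110011"), ("-M","110011"),
   ("D+1","011111"), ("A+1","110111"), ("M+1","110111"), ("D-1","001110"),
   ("A-1","110010"), ("M-1","110010"), ("D+A","000010"), ("D+M","000010"),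
   ("D-A","010011"), ("D-M","010011"), ("A-D","000111"), ("M-D","000111"),
   ("D&A","000000"), ("D&M","000000"), ("D|A","010101"), ("D|M","010101")]

def pvDest : PySem.Dict String String := PySem.Dict.ofList
  [("M","001"), ("D","010"), ("DM","011"), ("MD","011"),
   ("A","100"), ("AM","101"), ("AD","110"), ("ADM","111")]

def pvJump : PySem.Dict String String := PySem.Dict.ofList
  [("JGT","001"), ("JEQ","010"), ("JGE","011"), ("JLT","100"),
   ("JNE","101"), ("JLE","110"), ("JMP","111")]

-- ===== PORT A =====
-- str(aval)+str(cval)+... of A's return, with cval/aval Option (none = Python's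
-- UnboundLocalError; any none anywhere = Python raised, outside Pre_, port returns "")
def pvFin : Option (Option String × Option Int × String × String) → String
  | some (some cv, some av, destval, jval) =>
      "111" ++ PySem.Int.toStr av ++ cv ++ destval ++ jval
  | _ => ""

-- literal port of A's `for i in range(len(line))` loop; state = (part, dest_exist,
-- comp_exist, jval, destval) plus cval/aval as Option; dict KeyError = none result.
def CinstrLoopA (n : Nat) : List Char → Nat → List Char → Bool → Bool → String → String →
    Option String → Option Int → Option (Option String × Option Int × String × String)
  | [], _, _, _, _, jval, destval, cval, aval => some (cval, aval, destval, jval)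
  | c :: rest, i, part, dE, cE, jval, destval, cval, aval =>
    if c = '=' then
      match pvDest.get? (String.ofList part) with
      | none => none          -- KeyError
      | some d => CinstrLoopA n rest (i+1) [] true cE jval d cval aval
    else if c = ';' then
      match pvComp.get? (String.ofList part) with
      | none => none          -- KeyError
      | some cv =>
        CinstrLoopA n rest (i+1) [] dE true jval destval (some cv)
          (some (if part.contains 'M' then 1 else 0))
    else if i = n - 1 ∧ cE = false then
      match pvComp.get? (String.ofList (part ++ [c])) with
      | none => none          -- KeyError
      | some cv =>
        CinstrLoopA n rest (i+1) [] dE true jval destval (some cv)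
          (some (if (part ++ [c]).contains 'M' then 1 else 0))
    else if i = n - 1 then
      match pvJump.get? (String.ofList (part ++ [c])) with
      | none => none          -- KeyError
      | some jv => CinstrLoopA n rest (i+1) (part ++ [c]) dE cE jv destval cval aval
    else
      CinstrLoopA n rest (i+1) (part ++ [c]) dE cE jval destval cval aval

def Cinstruction (line : String) : String :=
  pvFin (CinstrLoopA line.toList.length line.toList 0 [] false false "000" "000" none none)

-- ===== PORT B =====
-- s.split(sep, 1): exact hand port (splits at the FIRST occurrence of sep)
def pvSplitOnce (sep : Char) : List Char → List Char × List Char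
  | [] => ([], [])
  | c :: rest =>
    if c = sep then ([], rest)
    else
      let p := pvSplitOnce sep rest
      (c :: p.1, p.2)

def Cinstruction_alt (line : String) : String :=
  let cs := line.toList
  let dr : Option String × List Char :=
    if cs.contains '=' then
      let p := pvSplitOnce '=' cs
      (pvDest.get? (String.ofList p.1), p.2)
    else (some "000", cs)
  match dr.1 with
  | none => ""   -- KeyError in Python; outside Pre_
  | some destval =>
    let cj : List Char × Option String :=
      if dr.2.contains ';' then
        let p := pvSplitOnce ';' dr.2
        (p.1, if p.2.isEmpty then some "000" else pvJump.get? (String.ofList p.2))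
      else (dr.2, some "000")
    match cj.2 with
    | none => ""   -- KeyError in Python; outside Pre_
    | some jval =>
      match pvComp.get? (String.ofList cj.1) with
      | none => ""   -- KeyError in Python; outside Pre_
      | some cval =>
        let aval : Int := if cj.1.contains 'M' then 1 else 0
        "111" ++ PySem.Int.toStr aval ++ cval ++ destval ++ jval

-- ===== PRECONDITION & SPEC =====
def pvDestKeys : List String := ["M","D","DM","MD","A","AM","AD","ADM"]
def pvJumpKeys : List String := ["JGT","JEQ","JGE","JLT","JNE","JLE","JMP"]
def pvCompKeys : List String :=
  ["0","1","-1","D","A","M","!D","!A","!M","-D","-A","-M","D+1","A+1","M+1","D-1",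
   "A-1","M-1","D+A","D+M","D-A","D-M","A-D","M-D","D&A","D&M","D|A","D|M"]

-- Pre_ admits exactly the well-formed C-instructions: optional '<dest key>=', then a comp
-- key, then optionally a bare ';' or ';<jump key>'.  It excludes (a) every input on which
-- the Python A raises (empty or garbled lines: KeyError/UnboundLocalError) and (b) lines
-- with extra '='/';' segments (e.g. "M=D=0" or "0;D="), on which A still returns a value
-- only because its scan accidentally re-runs the dest/comp lookup, and B naturally raises.
def pvValidLines : List String :=
  ("" :: pvDestKeys.map (· ++ "=")).flatMap fun d =>
    pvCompKeys.flatMap fun c =>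
      ("" :: ";" :: pvJumpKeys.map (";" ++ ·)).map fun j => d ++ c ++ j

def Pre_Cinstruction (line : String) : Prop := line ∈ pvValidLines
instance (line : String) : Decidable (Pre_Cinstruction line) := by
  unfold Pre_Cinstruction; infer_instance

def pvWitness_Cinstruction : String := "0"

def Spec_Cinstruction (line : String) (out : String) : Prop := out = Cinstruction_alt line
instance (line : String) (out : String) : Decidable (Spec_Cinstruction line out) := by
  unfold Spec_Cinstruction; infer_instance

-- ===== CLAIM (what is proved, stated in full; the proofs are below) =====
def Claim_equal_Cinstruction : Prop := ∀ (line : String), Dom_Cinstruction line → Pre_Cinstruction line → Spec_Cinstruction line (Cinstruction line)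

-- ===== LEMMAS AND PROOFS =====

-- a line of shape [dest '='] comp [';' jump]: the three optional fields, encoded
def pvJenc : Option (List Char) → List Char
  | none => []
  | some jj => ';' :: jj

def pvEncode (d : Option (List Char)) (c : List Char) (j : Option (List Char)) : List Char :=
  (match d with | none => [] | some dd => dd ++ ['=']) ++ c ++ pvJenc j

-- the jump field's value as both programs see it ('000' when absent or empty)
def pvJv : Option (List Char) → Option String
  | none => some "000"
  | some [] => some "000"
  | some jj => pvJump.get? (String.ofList jj)

-- the common value of both ports on a [dest '='] comp [';' jump] line
def pvOut (d : Option (List Char)) (c : List Char) (j : Option (List Char)) : String :=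
  match (match d with | none => some "000" | some dd => pvDest.get? (String.ofList dd)),
        pvComp.get? (String.ofList c), pvJv j with
  | some dv, some cv, some jv =>
      "111" ++ PySem.Int.toStr (if c.contains 'M' then (1:Int) else 0) ++ cv ++ dv ++ jv
  | _, _, _ => ""

theorem pvJv_eq (jj : List Char) :
    pvJv (some jj) = if jj.isEmpty then some "000" else pvJump.get? (String.ofList jj) := by
  cases jj <;> simp [pvJv]

theorem comp_empty : pvComp.get? "" = none := by decide

-- A's loop over separator-free chars that never reach the last index just accumulates
theorem loopA_plain (n : Nat) (cs : List Char) (h : ∀ ch ∈ cs, ch ≠ '=' ∧ ch ≠ ';') :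
    ∀ (rest : List Char) (i : Nat) (part : List Char) (dE cE : Bool) (jv dv : String)
      (cval : Option String) (aval : Option Int), i + cs.length < n →
    CinstrLoopA n (cs ++ rest) i part dE cE jv dv cval aval
      = CinstrLoopA n rest (i + cs.length) (part ++ cs) dE cE jv dv cval aval := by
  induction cs with
  | nil => intro rest i part dE cE jv dv cval aval _; simp
  | cons c cs ih =>
    intro rest i part dE cE jv dv cval aval hlt
    obtain ⟨h1, h2⟩ := h c (List.mem_cons_self ..)
    have hne : ¬ i = n - 1 := by simp at hlt; omega
    simp only [List.cons_append, CinstrLoopA, if_neg h1, if_neg h2,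
      if_neg (fun hp => hne (And.left hp)), if_neg hne]
    rw [ih (fun ch hm => h ch (List.mem_cons_of_mem _ hm)) rest (i+1) (part ++ [c])
        dE cE jv dv cval aval (by simp at hlt ⊢; omega)]
    congr 1
    · simp; omega
    · simp

-- A's loop from the comp stage on (after any dest field was consumed)
theorem loopA_stage2 (n : Nat) (c : List Char) (j : Option (List Char)) (i : Nat)
    (dE : Bool) (dv : String)
    (hc : ∀ ch ∈ c, ch ≠ '=' ∧ ch ≠ ';')
    (hj : ∀ jj, j = some jj → ∀ ch ∈ jj, ch ≠ '=' ∧ ch ≠ ';')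
    (hn : i + (c ++ pvJenc j).length = n) :
    pvFin (CinstrLoopA n (c ++ pvJenc j) i [] dE false "000" dv none none) =
      match pvComp.get? (String.ofList c), pvJv j with
      | some cv, some jv =>
          "111" ++ PySem.Int.toStr (if c.contains 'M' then (1:Int) else 0) ++ cv ++ dv ++ jv
      | _, _ => "" := by
  rcases List.eq_nil_or_concat' c with rfl | ⟨c', cl, rfl⟩
  · cases j with
    | none => simp [pvJenc, CinstrLoopA, pvFin, comp_empty, pvJv]
    | some jj =>
      simp [pvJenc, CinstrLoopA, pvFin, comp_empty]
  · obtain ⟨hcl1, hcl2⟩ := hc cl (by simp)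
    have hc' : ∀ ch ∈ c', ch ≠ '=' ∧ ch ≠ ';' := fun ch hm => hc ch (by simp [hm])
    rw [List.append_assoc, loopA_plain n c' hc' _ i [] dE false "000" dv none none
        (by simp at hn ⊢; cases j <;> simp [pvJenc] at hn ⊢ <;> omega)]
    cases j with
    | none =>
      have hlast : i + c'.length = n - 1 := by simp [pvJenc] at hn; omega
      cases hcv : pvComp.get? (String.ofList (c' ++ [cl])) with
      | none =>
        simp only [String.ofList_append] at hcv
        simp [pvJenc, CinstrLoopA, pvFin, hlast, hcl1, hcl2, hcv]
      | some cv =>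
        simp only [String.ofList_append] at hcv
        simp [pvJenc, CinstrLoopA, pvFin, pvJv, hlast, hcl1, hcl2, hcv]
    | some jj =>
      have hmid : ¬ i + c'.length = n - 1 := by simp [pvJenc] at hn; omega
      simp only [pvJenc, List.nil_append, List.cons_append,
        CinstrLoopA, if_neg hcl1, if_neg hcl2,
        if_neg (fun hp => hmid (And.left hp)), if_neg hmid]
      simp only [if_neg (show ¬(';' = '=') by decide)]
      cases hcv : pvComp.get? (String.ofList ([] ++ (c' ++ [cl]))) with
      | none => simp at hcv; simp [pvFin, hcv]
      | some cv =>
        simp only [List.nil_append] at hcv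
        simp only [hcv]
        rcases List.eq_nil_or_concat' jj with rfl | ⟨j', jl, rfl⟩
        · simp [CinstrLoopA, pvFin, pvJv]
        · obtain ⟨hjl1, hjl2⟩ := hj _ rfl jl (by simp)
          have hj' : ∀ ch ∈ j', ch ≠ '=' ∧ ch ≠ ';' :=
            fun ch hm => hj _ rfl ch (by simp [hm])
          rw [show (j' ++ [jl] : List Char) = j' ++ [jl] ++ [] by simp, List.append_assoc,
            loopA_plain n j' hj' _ _ [] dE true "000" dv (some cv) _
              (by simp [pvJenc] at hn ⊢; omega)]
          have hlast : i + c'.length + 1 + 1 + j'.length = n - 1 := by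
            simp [pvJenc] at hn; omega
          cases hjv : pvJump.get? (String.ofList (j' ++ [jl])) with
          | none =>
            simp only [String.ofList_append] at hjv hcv
            simp [CinstrLoopA, pvFin, pvJv_eq, hjv, hlast, hjl1, hjl2]
          | some jvv =>
            simp only [String.ofList_append] at hjv hcv
            simp [CinstrLoopA, pvFin, pvJv_eq, hjv, hlast, hjl1, hjl2]

-- port A evaluated on a [dest '='] comp [';' jump] line
theorem A_eval (d : Option (List Char)) (c : List Char) (j : Option (List Char))
    (hd : ∀ dd, d = some dd → ∀ ch ∈ dd, ch ≠ '=' ∧ ch ≠ ';')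
    (hc : ∀ ch ∈ c, ch ≠ '=' ∧ ch ≠ ';')
    (hj : ∀ jj, j = some jj → ∀ ch ∈ jj, ch ≠ '=' ∧ ch ≠ ';') :
    Cinstruction (String.ofList (pvEncode d c j)) = pvOut d c j := by
  unfold Cinstruction
  rw [String.toList_ofList]
  cases d with
  | none =>
    simp only [pvEncode, List.nil_append]
    rw [loopA_stage2 _ c j 0 false "000" hc hj (by simp)]
    cases hcv : pvComp.get? (String.ofList c) <;> cases hjv : pvJv j <;>
      simp [pvOut, hcv, hjv]
  | some dd =>
    simp only [pvEncode]
    rw [show (dd ++ ['='] ++ c ++ pvJenc j : List Char) = dd ++ ('=' :: (c ++ pvJenc j))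
        by simp]
    rw [loopA_plain _ dd (hd dd rfl) _ 0 [] false false "000" "000" none none (by simp)]
    simp only [CinstrLoopA, List.nil_append, reduceIte]
    cases hdv : pvDest.get? (String.ofList dd) with
    | none => simp [pvFin, pvOut, hdv]
    | some dvv =>
      rw [loopA_stage2 _ c j (0 + dd.length + 1) true dvv hc hj (by simp; omega)]
      cases hcv : pvComp.get? (String.ofList c) <;> cases hjv : pvJv j <;>
        simp [pvOut, hcv, hjv, hdv]

theorem contains_eq_false_of_not_mem {a : Char} {cs : List Char} (h : a ∉ cs) :
    cs.contains a = false := by simp [h]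

theorem splitOnce_append (sep : Char) (a b : List Char) (ha : sep ∉ a) :
    pvSplitOnce sep (a ++ sep :: b) = (a, b) := by
  induction a with
  | nil => simp [pvSplitOnce]
  | cons c a ih =>
    have h1 : ¬ c = sep := fun hh => ha (by simp [hh])
    simp [pvSplitOnce, if_neg h1, ih (fun hm => ha (by simp [hm]))]

-- port B evaluated on a [dest '='] comp [';' jump] line
theorem B_eval (d : Option (List Char)) (c : List Char) (j : Option (List Char))
    (hd : ∀ dd, d = some dd → ∀ ch ∈ dd, ch ≠ '=' ∧ ch ≠ ';')
    (hc : ∀ ch ∈ c, ch ≠ '=' ∧ ch ≠ ';')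
    (hj : ∀ jj, j = some jj → ∀ ch ∈ jj, ch ≠ '=' ∧ ch ≠ ';') :
    Cinstruction_alt (String.ofList (pvEncode d c j)) = pvOut d c j := by
  have hcne : '=' ∉ c := fun hm => (hc _ hm).1 rfl
  have hcns : ';' ∉ c := fun hm => (hc _ hm).2 rfl
  have hjne : '=' ∉ pvJenc j := by
    cases j with
    | none => simp [pvJenc]
    | some jj =>
      simp only [pvJenc, List.mem_cons]
      rintro (h | hm)
      · exact absurd h.symm (by decide)
      · exact (hj _ rfl _ hm).1 rfl
  unfold Cinstruction_alt
  rw [String.toList_ofList]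
  cases d with
  | none =>
    have hne : (pvEncode none c j).contains '=' = false := by
      apply contains_eq_false_of_not_mem
      simp only [pvEncode, List.nil_append, List.mem_append]
      rintro (hm | hm)
      · exact hcne hm
      · exact hjne hm
    simp only [pvEncode, List.nil_append] at hne ⊢
    simp only [hne, Bool.false_eq_true, reduceIte]
    cases j with
    | none =>
      have hns : (c ++ pvJenc none).contains ';' = false := by
        apply contains_eq_false_of_not_mem; simp [pvJenc, hcns]
      simp only [pvJenc, List.append_nil] at hns ⊢
      simp only [hns, Bool.false_eq_true, reduceIte]
      cases hcv : pvComp.get? (String.ofList c) <;> simp [pvOut, hcv, pvJv]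
    | some jj =>
      have hns : (c ++ pvJenc (some jj)).contains ';' = true := by simp [pvJenc]
      simp only [pvJenc] at hns ⊢
      simp only [hns, reduceIte, splitOnce_append ';' c jj hcns, ← pvJv_eq jj]
      cases hjv : pvJv (some jj) with
      | none => simp [pvOut, hjv]
      | some jvv =>
        cases hcv : pvComp.get? (String.ofList c) <;> simp [pvOut, hcv, hjv]
  | some dd =>
    have hde : (pvEncode (some dd) c j).contains '=' = true := by simp [pvEncode]
    have hdne : '=' ∉ dd := fun hm => (hd _ rfl _ hm).1 rfl
    have hdsp : pvSplitOnce '=' (pvEncode (some dd) c j) = (dd, c ++ pvJenc j) := by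
      simp only [pvEncode, List.append_assoc, List.singleton_append]
      exact splitOnce_append '=' dd (c ++ pvJenc j) hdne
    simp only [pvEncode] at hde hdsp ⊢
    simp only [hde, reduceIte, hdsp]
    cases hdv : pvDest.get? (String.ofList dd) with
    | none => simp [pvOut, hdv]
    | some dvv =>
      cases j with
      | none =>
        have hns : (c ++ pvJenc none).contains ';' = false := by
          apply contains_eq_false_of_not_mem; simp [pvJenc, hcns]
        simp only [pvJenc, List.append_nil] at hns ⊢
        simp only [hns, Bool.false_eq_true, reduceIte]
        cases hcv : pvComp.get? (String.ofList c) <;> simp [pvOut, hcv, hdv, pvJv]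
      | some jj =>
        have hns : (c ++ pvJenc (some jj)).contains ';' = true := by simp [pvJenc]
        simp only [pvJenc] at hns ⊢
        simp only [hns, reduceIte, splitOnce_append ';' c jj hcns, ← pvJv_eq jj]
        cases hjv : pvJv (some jj) with
        | none => simp [pvOut, hjv, hdv]
        | some jvv =>
          cases hcv : pvComp.get? (String.ofList c) <;> simp [pvOut, hcv, hjv, hdv]

theorem str_eq_ofList {s : String} {l : List Char} (h : s.toList = l) :
    s = String.ofList l := by rw [← h, String.ofList_toList]

theorem ports_agree (d : Option (List Char)) (c : List Char) (j : Option (List Char))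
    (hd : ∀ dd, d = some dd → ∀ ch ∈ dd, ch ≠ '=' ∧ ch ≠ ';')
    (hc : ∀ ch ∈ c, ch ≠ '=' ∧ ch ≠ ';')
    (hj : ∀ jj, j = some jj → ∀ ch ∈ jj, ch ≠ '=' ∧ ch ≠ ';') :
    Cinstruction (String.ofList (pvEncode d c j))
      = Cinstruction_alt (String.ofList (pvEncode d c j)) :=
  (A_eval d c j hd hc hj).trans (B_eval d c j hd hc hj).symm

theorem destKeys_SF : ∀ s ∈ pvDestKeys, ∀ ch ∈ s.toList, ch ≠ '=' ∧ ch ≠ ';' := by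
  simp [pvDestKeys]
theorem compKeys_SF : ∀ s ∈ pvCompKeys, ∀ ch ∈ s.toList, ch ≠ '=' ∧ ch ≠ ';' := by
  simp [pvCompKeys]
theorem jumpKeys_SF : ∀ s ∈ pvJumpKeys, ∀ ch ∈ s.toList, ch ≠ '=' ∧ ch ≠ ';' := by
  simp [pvJumpKeys]

-- ===== VERDICT (by name: the statement is the Claim_ definition above) =====
theorem Cinstruction_spec : Claim_equal_Cinstruction := by
  intro line _ hpre
  show Cinstruction line = Cinstruction_alt line
  unfold Pre_Cinstruction pvValidLines at hpre
  obtain ⟨dOpt, hdO, hrest⟩ := List.mem_flatMap.1 hpre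
  obtain ⟨cKey, hcK, hrest⟩ := List.mem_flatMap.1 hrest
  obtain ⟨jOpt, hjO, hline⟩ := List.mem_map.1 hrest
  subst hline
  have hc := compKeys_SF cKey hcK
  -- pick the d-field
  have hdCase : (dOpt = "" ∧ True) ∨ ∃ dk ∈ pvDestKeys, dOpt = dk ++ "=" := by
    rcases List.mem_cons.1 hdO with h | h
    · exact Or.inl ⟨h, trivial⟩
    · obtain ⟨dk, hdk, rfl⟩ := List.mem_map.1 h; exact Or.inr ⟨dk, hdk, rfl⟩
  have hjCase : jOpt = "" ∨ jOpt = ";" ∨ ∃ jk ∈ pvJumpKeys, jOpt = ";" ++ jk := by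
    rcases List.mem_cons.1 hjO with h | h
    · exact Or.inl h
    rcases List.mem_cons.1 h with h | h
    · exact Or.inr (Or.inl h)
    · obtain ⟨jk, hjk, rfl⟩ := List.mem_map.1 h; exact Or.inr (Or.inr ⟨jk, hjk, rfl⟩)
  -- express the line as String.ofList (pvEncode d c j) and appeal to ports_agree
  rcases hdCase with ⟨rfl, -⟩ | ⟨dk, hdk, rfl⟩ <;>
    rcases hjCase with rfl | rfl | ⟨jk, hjk, rfl⟩
  · rw [show (("" : String) ++ cKey ++ "" : String)
        = String.ofList (pvEncode none cKey.toList none) by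
      apply str_eq_ofList
      simp [pvEncode, pvJenc]]
    exact ports_agree none cKey.toList none (by rintro _ ⟨⟩) hc (by rintro _ ⟨⟩)
  · rw [show (("" : String) ++ cKey ++ ";" : String)
        = String.ofList (pvEncode none cKey.toList (some [])) by
      apply str_eq_ofList
      simp [pvEncode, pvJenc]]
    exact ports_agree none cKey.toList (some [])
      (by rintro _ ⟨⟩) hc (by rintro jj h; cases h; rintro _ ⟨⟩)
  · rw [show (("" : String) ++ cKey ++ (";" ++ jk) : String)
        = String.ofList (pvEncode none cKey.toList (some jk.toList)) by
      apply str_eq_ofList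
      simp [pvEncode, pvJenc]]
    exact ports_agree none cKey.toList (some jk.toList)
      (by rintro _ ⟨⟩) hc (by rintro jj h; cases h; exact jumpKeys_SF jk hjk)
  · rw [show ((dk ++ "=" : String) ++ cKey ++ "" : String)
        = String.ofList (pvEncode (some dk.toList) cKey.toList none) by
      apply str_eq_ofList
      simp [pvEncode, pvJenc]]
    exact ports_agree (some dk.toList) cKey.toList none
      (by rintro dd h; cases h; exact destKeys_SF dk hdk) hc (by rintro _ ⟨⟩)
  · rw [show ((dk ++ "=" : String) ++ cKey ++ ";" : String)
        = String.ofList (pvEncode (some dk.toList) cKey.toList (some [])) by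
      apply str_eq_ofList
      simp [pvEncode, pvJenc]]
    exact ports_agree (some dk.toList) cKey.toList (some [])
      (by rintro dd h; cases h; exact destKeys_SF dk hdk) hc
      (by rintro jj h; cases h; rintro _ ⟨⟩)
  · rw [show ((dk ++ "=" : String) ++ cKey ++ (";" ++ jk) : String)
        = String.ofList (pvEncode (some dk.toList) cKey.toList (some jk.toList)) by
      apply str_eq_ofList
      simp [pvEncode, pvJenc]]
    exact ports_agree (some dk.toList) cKey.toList (some jk.toList)
      (by rintro dd h; cases h; exact destKeys_SF dk hdk) hc
      (by rintro jj h; cases h; exact jumpKeys_SF jk hjk)
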